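-- pv_equiv track=rewrite | github.com/snuderl/AdvendOfCode2018 | ex18.py | neighouring
-- ===== SOURCE A (Python) =====
-- def neighouring(grid, x, y):
--     trees, lumber = 0, 0
--     for yy in range(-1, 2):
--         yyy = y + yy
--         if yyy < 0 or yyy >= len(grid):
--             continue
--
--         g = grid[yyy]
--
--         for xx in range(-1, 2):
--             xxx = x + xx
--             if xxx < 0 or xxx >= len(g):
--                 continue
--             if xx == 0 and yy == 0:
--                 continue
--
--             if g[xxx] == "|":
--                 trees += 1
--             if g[xxx] == "#":
--                 lumber += 1
--     return trees, lumber
-- ===== SOURCE B (Python) =====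
-- def neighouring(grid, x, y):
--     trees, lumber = 0, 0
--     for row in grid[max(0, y - 1):max(0, y + 2)]:
--         block = row[max(0, x - 1):max(0, x + 2)]
--         trees += block.count("|")
--         lumber += block.count("#")
--     if 0 <= y < len(grid) and 0 <= x < len(grid[y]):
--         c = grid[y][x]
--         trees -= c == "|"
--         lumber -= c == "#"
--     return trees, lumber
-- ===== Notes on version B (the rewrite author's own statement) =====
-- stated objective: alternative
-- what changed: A scans the 8 neighbor offsets with per-cell bounds checks and two interleaved counters; B slices the clamped 3x3 block out of the grid (a row slice, then a column slice per row), totals str.count('|') and str.count('#') over the block slices, and subtracts the center cell if it is in range.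
import Mathlib
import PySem

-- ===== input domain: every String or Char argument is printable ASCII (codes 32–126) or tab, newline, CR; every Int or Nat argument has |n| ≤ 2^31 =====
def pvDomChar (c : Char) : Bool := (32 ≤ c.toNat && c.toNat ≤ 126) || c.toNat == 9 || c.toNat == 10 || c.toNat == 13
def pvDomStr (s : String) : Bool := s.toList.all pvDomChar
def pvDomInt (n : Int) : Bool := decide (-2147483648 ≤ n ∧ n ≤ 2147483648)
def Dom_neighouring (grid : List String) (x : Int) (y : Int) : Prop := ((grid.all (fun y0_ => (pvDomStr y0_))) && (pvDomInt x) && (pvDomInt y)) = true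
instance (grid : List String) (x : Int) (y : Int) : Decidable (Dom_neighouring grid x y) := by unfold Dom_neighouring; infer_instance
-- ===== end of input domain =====

-- B replaces A's 3x3 offset double loop by slicing: it counts '|' and '#' in the sliced
-- 3x3 block (clamped row slice, then clamped column slice per row, str.count on each)
-- and subtracts the center cell (objective: simpler, slice-and-count; same cost).

-- ===== PORT A =====
-- A's inner loop body: one cell of 'for xx in range(-1,2)' (counters threaded through).
def pvStepA (x : Int) (yy : Int) (g : String) (st2 : Int × Int) (xx : Int) : Int × Int :=
  let xxx := x + xx
  if xxx < 0 ∨ xxx ≥ PySem.Str.len g then st2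
  else if xx = 0 ∧ yy = 0 then st2
  else match PySem.Str.pyGet? g xxx with
    | none => st2
    | some c =>
      ((if c = '|' then st2.1 + 1 else st2.1),
       (if c = '#' then st2.2 + 1 else st2.2))

-- A's inner 'for xx in range(-1,2)' loop over one row g.
def pvRowA (x : Int) (yy : Int) (g : String) (st : Int × Int) : Int × Int :=
  [(-1 : Int), 0, 1].foldl (pvStepA x yy g) st

def neighouring (grid : List String) (x : Int) (y : Int) : Int × Int :=
  [(-1 : Int), 0, 1].foldl (fun st yy =>
    let yyy := y + yy
    if yyy < 0 ∨ yyy ≥ PySem.List.len grid then st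
    else match PySem.List.pyGet? grid yyy with
      | none => st   -- unreachable: the guard above ensures the index is in range
      | some g => pvRowA x yy g st) (0, 0)

-- ===== PORT B =====
-- B's loop body: add the two str.count totals of this row's clamped 3-wide block
def pvStepB (x : Int) (st : Int × Int) (row : String) : Int × Int :=
  let block := PySem.Str.slice row (some (max 0 (x - 1))) (some (max 0 (x + 2)))
  (st.1 + (PySem.Str.count block "|" : Int), st.2 + (PySem.Str.count block "#" : Int))

def neighouring_alt (grid : List String) (x : Int) (y : Int) : Int × Int :=
  -- for row in grid[max(0,y-1):max(0,y+2)]: trees += block.count('|'); lumber += block.count('#')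
  let st := (PySem.List.slice grid (some (max 0 (y - 1))) (some (max 0 (y + 2)))).foldl
    (pvStepB x) (0, 0)
  -- if 0 <= y < len(grid) and 0 <= x < len(grid[y]): subtract the center cell
  if 0 ≤ y ∧ y < PySem.List.len grid then
    match PySem.List.pyGet? grid y with
    | none => st   -- unreachable: the guard above ensures the index is in range
    | some row =>
      if 0 ≤ x ∧ x < PySem.Str.len row then
        match PySem.Str.pyGet? row x with
        | none => st   -- unreachable likewise
        | some c =>
          (st.1 - (if c = '|' then 1 else 0), st.2 - (if c = '#' then 1 else 0))
      else st
  else st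

-- ===== PRECONDITION & SPEC =====
def Spec_neighouring (grid : List String) (x : Int) (y : Int) (out : Int × Int) : Prop := out = neighouring_alt grid x y
instance (grid : List String) (x : Int) (y : Int) (out : Int × Int) : Decidable (Spec_neighouring grid x y out) := by unfold Spec_neighouring; infer_instance

-- ===== CLAIM (what is proved, stated in full; the proofs are below) =====
def Claim_equal_neighouring : Prop := ∀ (grid : List String) (x : Int) (y : Int), Dom_neighouring grid x y → Spec_neighouring grid x y (neighouring grid x y)

-- ===== LEMMAS AND PROOFS =====

-- Python's s.count(c) for a single character c is List.count
theorem pvCountGo_singleton (c : Char) (l : List Char) : ∀ (fuel acc : Nat), l.length ≤ fuel →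
    PySem.Chars.count.go [c] fuel l acc = acc + l.count c := by
  induction l with
  | nil => intro fuel acc _; cases fuel <;> simp [PySem.Chars.count.go]
  | cons h t ih =>
    intro fuel acc hf
    cases fuel with
    | zero => simp at hf
    | succ f =>
      have hrec : PySem.Chars.count.go [c] (f + 1) (h :: t) acc =
          if [c].isPrefixOf (h :: t) then
            PySem.Chars.count.go [c] f (List.drop 1 (h :: t)) (acc + 1)
          else PySem.Chars.count.go [c] f t acc := by
        rfl
      rw [hrec]
      have hft : t.length ≤ f := by simpa using hf
      by_cases hc : c = h
      · subst hc
        have hpre : [c].isPrefixOf (c :: t) = true := by simp [List.isPrefixOf]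
        rw [if_pos hpre]
        simp only [List.drop_one, List.tail_cons]
        rw [ih f (acc + 1) hft]
        simp
        omega
      · have hpre : [c].isPrefixOf (h :: t) = false := by simp [List.isPrefixOf, hc]
        rw [if_neg (by simp [hpre])]
        rw [ih f acc hft]
        simp [Ne.symm hc]

theorem pvCount_singleton (cs : List Char) (c : Char) :
    PySem.Chars.count cs [c] = cs.count c := by
  have := pvCountGo_singleton c cs cs.length 0 le_rfl
  simpa [PySem.Chars.count] using this

-- element at a Python-valid nonnegative index, none when out of range
def pvAt {α : Type} (xs : List α) (i : Int) : Option α :=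
  if 0 ≤ i then xs[i.toNat]? else none

-- the character of the neighborhood cell at offset (dx,dy), if it exists
def pvCell (grid : List String) (x : Int) (y : Int) (dx : Int) (dy : Int) : Option Char :=
  (pvAt grid (y + dy)).bind (fun g => pvAt g.toList (x + dx))

def pvRow9 (grid : List String) (x : Int) (y : Int) (dy : Int) : List Char :=
  (pvCell grid x y (-1) dy).toList ++ (pvCell grid x y 0 dy).toList ++ (pvCell grid x y 1 dy).toList

-- the full 3x3 block, center included
def pvFull (grid : List String) (x : Int) (y : Int) : List Char :=
  pvRow9 grid x y (-1) ++ pvRow9 grid x y 0 ++ pvRow9 grid x y 1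

def pvInd (o : Option Char) (c : Char) : Int := if o = some c then 1 else 0

theorem pvGetSome {α : Type} (xs : List α) (j : Int) (h0 : 0 ≤ j) (h1 : j.toNat < xs.length) :
    PySem.List.pyGet? xs j = some (xs[j.toNat]'h1) := by
  exact PySem.List.pyGet?_eq_some_getElem xs h0 (by omega)

-- one unfolding step of take over drop
theorem pvTakeStep {α : Type} (xs : List α) (n k : Nat) :
    (xs.drop n).take (k + 1) = (xs[n]?).toList ++ (xs.drop (n + 1)).take k := by
  by_cases h : n < xs.length
  · rw [List.drop_eq_getElem_cons h, List.take_succ_cons]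
    simp [List.getElem?_eq_getElem h]
  · have hle : xs.length ≤ n := Nat.le_of_not_lt h
    have h1 : xs.drop n = [] := List.drop_eq_nil_of_le hle
    have h2 : xs.drop (n + 1) = [] := List.drop_eq_nil_of_le (Nat.le_succ_of_le hle)
    have h3 : xs[n]? = none := List.getElem?_eq_none hle
    simp [h1, h2, h3]

-- a clamped 3-wide slice is exactly the three optional elements at x-1, x, x+1
theorem pvSlice3 {α : Type} (xs : List α) (x : Int) :
    PySem.List.slice xs (some (max 0 (x - 1))) (some (max 0 (x + 2))) =
      (pvAt xs (x - 1)).toList ++ (pvAt xs x).toList ++ (pvAt xs (x + 1)).toList := by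
  rw [PySem.List.slice_toNat xs (le_max_left 0 (x - 1)) (le_max_left 0 (x + 2))]
  rcases lt_trichotomy x 0 with hx | hx | hx
  · rcases lt_or_ge x (-1) with hx2 | hx2
    · -- x ≤ -2 : empty slice, all three indices negative
      have ha : (max 0 (x - 1)).toNat = 0 := by omega
      have hb : (max 0 (x + 2)).toNat = 0 := by omega
      simp only [ha, hb, Nat.sub_zero, List.take_zero]
      simp [pvAt, show ¬ (0 ≤ x) by omega, show ¬ (0 ≤ x + 1) by omega]
      intro h5
      omega
    · -- x = -1 : take 1 at index 0
      have hx1 : x = -1 := by omega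
      subst hx1
      have ha : (max 0 (-1 - 1 : Int)).toNat = 0 := by decide
      have hb : (max 0 (-1 + 2 : Int)).toNat = 1 := by decide
      rw [ha, hb]
      have h1 := pvTakeStep xs 0 0
      simp only [List.drop_zero, List.take_zero, List.append_nil] at h1
      simp [h1, pvAt]
  · -- x = 0 : take 2 at index 0
    subst hx
    have ha : (max 0 (0 - 1 : Int)).toNat = 0 := by decide
    have hb : (max 0 (0 + 2 : Int)).toNat = 2 := by decide
    rw [ha, hb]
    have h2 := pvTakeStep xs 1 0
    simp only [List.take_zero, List.append_nil] at h2
    have h1 := pvTakeStep xs 0 1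
    simp only [List.drop_zero, h2] at h1
    simp [h1, pvAt]
  · -- x ≥ 1 : take 3 at index x-1
    have ha : (max 0 (x - 1)).toNat = (x - 1).toNat := by omega
    have hb : (max 0 (x + 2)).toNat = (x - 1).toNat + 3 := by omega
    rw [ha, hb]
    have hsub : (x - 1).toNat + 3 - (x - 1).toNat = 3 := by omega
    rw [hsub]
    rw [pvTakeStep xs ((x-1).toNat) 2, pvTakeStep xs ((x-1).toNat + 1) 1,
        pvTakeStep xs ((x-1).toNat + 2) 0]
    have p1 : pvAt xs (x - 1) = xs[(x - 1).toNat]? := by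
      rw [pvAt, if_pos (show (0:Int) ≤ x - 1 by omega)]
    have p2 : pvAt xs x = xs[(x - 1).toNat + 1]? := by
      rw [pvAt, if_pos (show (0:Int) ≤ x by omega)]
      congr 1; omega
    have p3 : pvAt xs (x + 1) = xs[(x - 1).toNat + 2]? := by
      rw [pvAt, if_pos (show (0:Int) ≤ x + 1 by omega)]
      congr 1; omega
    rw [p1, p2, p3]
    simp [List.append_assoc]

-- the count of one row's 3-wide block
theorem pvBlockCount (grid : List String) (x y dy : Int) (g : String)
    (hg : pvAt grid (y + dy) = some g) (c : Char) (sub : String) (hsub : sub.toList = [c]) :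
    (PySem.Str.count (PySem.Str.slice g (some (max 0 (x - 1))) (some (max 0 (x + 2)))) sub : Int)
      = ((pvRow9 grid x y dy).count c : Int) := by
  have h1 : PySem.Str.count (PySem.Str.slice g (some (max 0 (x - 1))) (some (max 0 (x + 2)))) sub
      = PySem.Chars.count (PySem.List.slice g.toList (some (max 0 (x - 1))) (some (max 0 (x + 2)))) [c] := by
    simp [pysem, hsub]
  rw [h1, pvSlice3, pvCount_singleton]
  simp [pvRow9, pvCell, hg, List.count_append, sub_eq_add_neg]

-- === A reduces to counts over the center-less 3x3 neighborhood ===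

-- the neighbor char at offset (dx,dy), with the center excluded (A's reading)
def pvOpt (grid : List String) (x : Int) (y : Int) (dx : Int) (dy : Int) : Option Char :=
  if dx = 0 ∧ dy = 0 then none else pvCell grid x y dx dy

def pvRowChars (grid : List String) (x : Int) (y : Int) (dy : Int) : List Char :=
  (pvOpt grid x y (-1) dy).toList ++ (pvOpt grid x y 0 dy).toList ++ (pvOpt grid x y 1 dy).toList

def pvCanon (grid : List String) (x : Int) (y : Int) : List Char :=
  pvRowChars grid x y (-1) ++ pvRowChars grid x y 0 ++ pvRowChars grid x y 1

def pvFoldCount (st : Int × Int) (cs : List Char) : Int × Int :=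
  (st.1 + (cs.count '|' : Int), st.2 + (cs.count '#' : Int))

theorem pvFoldCount_append (st : Int × Int) (cs ds : List Char) :
    pvFoldCount (pvFoldCount st cs) ds = pvFoldCount st (cs ++ ds) := by
  simp [pvFoldCount, List.count_append]; constructor <;> ring

-- pvCell through the row actually present at y+dy
theorem pvCell_of_row (grid : List String) (x y dx dy : Int)
    (h : ¬ (y + dy < 0 ∨ y + dy ≥ PySem.List.len grid)) :
    pvCell grid x y dx dy =
      pvAt (grid[(y + dy).toNat]'(by simp [PySem.List.len_eq] at h; omega)).toList (x + dx) := by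
  have hlen : (y + dy).toNat < grid.length := by simp [PySem.List.len_eq] at h; omega
  simp [pvCell, pvAt, show (0:Int) ≤ y + dy by omega, List.getElem?_eq_getElem hlen]

theorem pvCell_none (grid : List String) (x y dx dy : Int)
    (h : y + dy < 0 ∨ y + dy ≥ PySem.List.len grid) : pvCell grid x y dx dy = none := by
  rcases h with h | h
  · simp [pvCell, pvAt, show ¬ (0 ≤ y + dy) by omega]
  · simp [PySem.List.len_eq] at h
    have : grid.length ≤ (y + dy).toNat := by omega
    simp [pvCell, pvAt, List.getElem?_eq_none this]

theorem pvStepA_eq (grid : List String) (x y dx dy : Int) (g : String)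
    (hg : PySem.List.pyGet? grid (y + dy) = some g)
    (h : ¬ (y + dy < 0 ∨ y + dy ≥ PySem.List.len grid)) (st : Int × Int) :
    pvStepA x dy g st dx = pvFoldCount st (pvOpt grid x y dx dy).toList := by
  have hlt : (y + dy).toNat < grid.length := by simp [PySem.List.len_eq] at h; omega
  have hgv : g = grid[(y + dy).toNat]'hlt := by
    rw [pvGetSome grid (y + dy) (by omega) hlt] at hg
    exact (Option.some_injective _ hg).symm
  have hcell : pvCell grid x y dx dy = pvAt g.toList (x + dx) := by
    rw [pvCell_of_row grid x y dx dy h, hgv]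
  simp only [pvStepA, pvOpt]
  by_cases h1 : x + dx < 0 ∨ x + dx ≥ PySem.Str.len g
  · rw [if_pos h1]
    have hnone : pvAt g.toList (x + dx) = none := by
      rcases h1 with h1 | h1
      · simp [pvAt, show ¬ (0 ≤ x + dx) by omega]
      · simp [PySem.Str.len] at h1
        have hlen2 : g.toList.length ≤ (x + dx).toNat := by simp; omega
        simp [pvAt, List.getElem?_eq_none hlen2]
    by_cases hc : dx = 0 ∧ dy = 0
    · simp [hc, pvFoldCount]
    · simp [hc, hcell, hnone, pvFoldCount]
  · rw [if_neg h1]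
    have hxr : 0 ≤ x + dx ∧ (x + dx).toNat < g.toList.length := by
      simp [PySem.Str.len] at h1 ⊢; omega
    have hsome : pvAt g.toList (x + dx) = some (g.toList[(x + dx).toNat]'hxr.2) := by
      simp [pvAt, hxr.1, List.getElem?_eq_getElem hxr.2]
    have hget : PySem.Str.pyGet? g (x + dx) = some (g.toList[(x + dx).toNat]'hxr.2) := by
      have := pvGetSome g.toList (x + dx) hxr.1 hxr.2
      simpa [pysem] using this
    by_cases hc : dx = 0 ∧ dy = 0
    · simp [hc, pvFoldCount]
    · rw [if_neg hc, if_neg hc, hget]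
      set ch := g.toList[(x + dx).toNat]'hxr.2
      by_cases c1 : ch = '|' <;> by_cases c2 : ch = '#' <;>
        simp_all [pvFoldCount]

theorem pvRowA_eq (grid : List String) (x y : Int) (dy : Int) (st : Int × Int) :
    (if y + dy < 0 ∨ y + dy ≥ PySem.List.len grid then st
     else match PySem.List.pyGet? grid (y + dy) with
       | none => st
       | some g => pvRowA x dy g st) = pvFoldCount st (pvRowChars grid x y dy) := by
  by_cases h : y + dy < 0 ∨ y + dy ≥ PySem.List.len grid
  · rw [if_pos h]
    simp [pvRowChars, pvFoldCount, pvOpt, pvCell_none grid x y _ dy h]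
  · rw [if_neg h]
    have hlt : (y + dy).toNat < grid.length := by simp [PySem.List.len_eq] at h; omega
    rw [pvGetSome grid (y + dy) (by omega) hlt]
    simp only [pvRowA, List.foldl_cons, List.foldl_nil]
    rw [pvStepA_eq grid x y (-1) dy _ (pvGetSome grid (y + dy) (by omega) hlt) h,
        pvStepA_eq grid x y 0 dy _ (pvGetSome grid (y + dy) (by omega) hlt) h,
        pvStepA_eq grid x y 1 dy _ (pvGetSome grid (y + dy) (by omega) hlt) h,
        pvFoldCount_append, pvFoldCount_append]
    simp [pvRowChars, List.append_assoc]

theorem pvA_eq (grid : List String) (x y : Int) :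
    neighouring grid x y = pvFoldCount (0, 0) (pvCanon grid x y) := by
  simp only [neighouring, List.foldl_cons, List.foldl_nil]
  rw [pvRowA_eq grid x y (-1), pvRowA_eq grid x y 0, pvRowA_eq grid x y 1,
    pvFoldCount_append, pvFoldCount_append]
  simp [pvCanon, List.append_assoc]

-- canon = full minus center, as counts
theorem pvCanon_count (grid : List String) (x y : Int) (c : Char) :
    ((pvFull grid x y).count c : Int) =
      ((pvCanon grid x y).count c : Int) + pvInd (pvCell grid x y 0 0) c := by
  have hrow : ∀ dy : Int, ¬ (dy = 0) → pvRow9 grid x y dy = pvRowChars grid x y dy := by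
    intro dy hdy
    simp [pvRow9, pvRowChars, pvOpt, hdy]
  have h0 : pvRowChars grid x y 0 =
      (pvCell grid x y (-1) 0).toList ++ (pvCell grid x y 1 0).toList := by
    simp [pvRowChars, pvOpt]
  have h9 : pvRow9 grid x y 0 =
      (pvCell grid x y (-1) 0).toList ++ (pvCell grid x y 0 0).toList ++ (pvCell grid x y 1 0).toList := rfl
  simp only [pvFull, pvCanon, hrow (-1) (by norm_num), hrow 1 (by norm_num), h0, h9,
    List.count_append]
  rcases hc : pvCell grid x y 0 0 with _ | d
  · simp [pvInd]
  · by_cases hdc : d = c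
    · subst hdc
      simp only [pvInd, Option.toList_some]
      simp
      ring
    · have hcnt : List.count c [d] = 0 := by
        simp [List.count_singleton']
        exact fun h => absurd h hdc
      simp only [pvInd, Option.toList_some, hcnt]
      rw [if_neg (by simp [hdc])]
      push_cast
      ring

-- === B reduces to the same counts ===

theorem pvRow9_nil (grid : List String) (x y dy : Int) (h : pvAt grid (y + dy) = none) :
    pvRow9 grid x y dy = [] := by
  simp [pvRow9, pvCell, h]

theorem pvStepB_eq (grid : List String) (x y dy : Int) (g : String)
    (hg : pvAt grid (y + dy) = some g) (st : Int × Int) :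
    pvStepB x st g = pvFoldCount st (pvRow9 grid x y dy) := by
  simp only [pvStepB, pvFoldCount]
  rw [pvBlockCount grid x y dy g hg '|' "|" (by decide),
      pvBlockCount grid x y dy g hg '#' "#" (by decide)]

theorem pvFoldCount_nil (st : Int × Int) : pvFoldCount st [] = st := by
  simp [pvFoldCount]

theorem pvFoldStepOpt (grid : List String) (x y dy : Int) (st : Int × Int) (l : List String) :
    ((pvAt grid (y + dy)).toList ++ l).foldl (pvStepB x) st
      = l.foldl (pvStepB x) (pvFoldCount st (pvRow9 grid x y dy)) := by
  rcases h : pvAt grid (y + dy) with _ | g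
  · rw [pvRow9_nil grid x y dy h, pvFoldCount_nil]
    simp
  · simp only [Option.toList_some, List.singleton_append, List.foldl_cons]
    rw [pvStepB_eq grid x y dy g h st]

theorem pvFoldB_eq (grid : List String) (x y : Int) :
    (PySem.List.slice grid (some (max 0 (y - 1))) (some (max 0 (y + 2)))).foldl
        (pvStepB x) (0, 0) = pvFoldCount (0, 0) (pvFull grid x y) := by
  rw [pvSlice3 grid y]
  rw [show y - 1 = y + (-1) by ring]
  rw [show pvAt grid y = pvAt grid (y + 0) by norm_num]
  rw [List.append_assoc, pvFoldStepOpt grid x y (-1), pvFoldStepOpt grid x y 0,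
      show (pvAt grid (y + 1)).toList = (pvAt grid (y + 1)).toList ++ ([] : List String) by simp,
      pvFoldStepOpt grid x y 1, List.foldl_nil, pvFoldCount_append, pvFoldCount_append]
  simp only [pvFull, List.append_assoc]

theorem pvB_eq (grid : List String) (x y : Int) :
    neighouring_alt grid x y =
      (((pvCanon grid x y).count '|' : Int), ((pvCanon grid x y).count '#' : Int)) := by
  have h1 := pvCanon_count grid x y '|'
  have h2 := pvCanon_count grid x y '#'
  simp only [neighouring_alt]
  rw [pvFoldB_eq]
  by_cases hy : 0 ≤ y ∧ y < PySem.List.len grid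
  · rw [if_pos hy]
    have hylen : y < (grid.length : Int) := by
      have := hy.2; rwa [PySem.List.len_eq] at this
    have hlt : y.toNat < grid.length := by omega
    rw [pvGetSome grid y hy.1 hlt]
    dsimp only
    have hcellrow : pvCell grid x y 0 0 = pvAt (grid[y.toNat]'hlt).toList (x + 0) := by
      have hn : ¬ (y + 0 < 0 ∨ y + 0 ≥ PySem.List.len grid) := by
        rw [PySem.List.len_eq]
        rintro (h5 | h5) <;> omega
      rw [pvCell_of_row grid x y 0 0 hn]
      simp only [add_zero]
    have hTL : (grid[y.toNat]'hlt).toList.length = (grid[y.toNat]'hlt).length := by simp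
    by_cases hx : 0 ≤ x ∧ x < PySem.Str.len (grid[y.toNat]'hlt)
    · rw [if_pos hx]
      have hxs : x < ((grid[y.toNat]'hlt).length : Int) := by
        have := hx.2; simp [PySem.Str.len] at this; omega
      have hxl : x.toNat < (grid[y.toNat]'hlt).toList.length := by omega
      have hget : PySem.Str.pyGet? (grid[y.toNat]'hlt) x
          = some ((grid[y.toNat]'hlt).toList[x.toNat]'hxl) := by
        rw [show PySem.Str.pyGet? (grid[y.toNat]'hlt) x
            = PySem.List.pyGet? (grid[y.toNat]'hlt).toList x by simp [pysem]]
        exact pvGetSome (grid[y.toNat]'hlt).toList x hx.1 hxl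
      rw [hget]
      have hcenter : pvCell grid x y 0 0 = some ((grid[y.toNat]'hlt).toList[x.toNat]'hxl) := by
        rw [hcellrow]
        simp [pvAt, hx.1, List.getElem?_eq_getElem hxl]
      rw [hcenter] at h1 h2
      set ch := (grid[y.toNat]'hlt).toList[x.toNat]'hxl with hch
      have i1 : pvInd (some ch) '|' = if ch = '|' then 1 else 0 := by simp [pvInd]
      have i2 : pvInd (some ch) '#' = if ch = '#' then 1 else 0 := by simp [pvInd]
      rw [i1] at h1
      rw [i2] at h2
      simp only [pvFoldCount]
      rw [Prod.mk.injEq]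
      constructor <;> split_ifs at h1 h2 ⊢ <;> omega
    · rw [if_neg hx]
      have hcenter : pvCell grid x y 0 0 = none := by
        rw [hcellrow]
        rcases not_and_or.mp hx with h | h
        · simp only [pvAt]
          rw [if_neg (by omega)]
        · have hxs : ((grid[y.toNat]'hlt).length : Int) ≤ x := by
            have h2 := not_lt.mp h; simp [PySem.Str.len] at h2; omega
          have hge : (grid[y.toNat]'hlt).toList.length ≤ (x + 0).toNat := by omega
          simp only [pvAt]
          split_ifs with h5
          · exact List.getElem?_eq_none hge
          · rfl
      rw [hcenter] at h1 h2
      simp [pvInd] at h1 h2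
      simp only [pvFoldCount]
      rw [Prod.mk.injEq]
      constructor <;> omega
  · rw [if_neg hy]
    have hcenter : pvCell grid x y 0 0 = none := by
      apply pvCell_none
      rw [PySem.List.len_eq] at hy ⊢
      omega
    rw [hcenter] at h1 h2
    simp [pvInd] at h1 h2
    simp only [pvFoldCount]
    rw [Prod.mk.injEq]
    constructor <;> omega

-- ===== VERDICT (by name: the statement is the Claim_ definition above) =====
theorem neighouring_spec : Claim_equal_neighouring := by
  intro grid x y _
  show neighouring grid x y = neighouring_alt grid x y
  rw [pvA_eq, pvB_eq]
  simp [pvFoldCount]
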